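-- pv_equiv track=rewrite | github.com/marcoIbrahim0/awsautopilot | backend/workers/services/post_apply_reconcile.py | _service_for_action
-- ===== SOURCE A (Python) =====
-- _SERVICE_PREFIXES: tuple[tuple[str, str], ...] = (
--     ("s3_", "s3"),
--     ("ec2_", "ec2"),
--     ("iam_", "iam"),
--     ("rds_", "rds"),
--     ("ebs_", "ebs"),
--     ("eks_", "eks"),
--     ("ssm_", "ssm"),
--     ("guardduty_", "guardduty"),
--     ("cloudtrail_", "cloudtrail"),
--     ("config_", "config"),
-- )
--
-- def _service_for_action(action_type: object) -> str | None:
--     token = str(action_type or "").strip().lower()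
--     if not token:
--         return None
--     for prefix, service in _SERVICE_PREFIXES:
--         if token.startswith(prefix):
--             return service
--     return None
-- ===== SOURCE B (Python) =====
-- _SERVICES = frozenset({
--     "s3", "ec2", "iam", "rds", "ebs", "eks", "ssm",
--     "guardduty", "cloudtrail", "config",
-- })
--
-- def _service_for_action(action_type: object) -> str | None:
--     token = str(action_type or "").strip().lower()
--     if not token:
--         return None
--     head, sep, _rest = token.partition("_")
--     return head if sep and head in _SERVICES else None
-- ===== Notes on version B (the rewrite author's own statement) =====
-- stated objective: idiomatic
-- what changed: Replaces the linear scan over ten (prefix, service) pairs with repeated startswith calls by a single partition at the first underscore followed by one set-membership lookup.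
import Mathlib
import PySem

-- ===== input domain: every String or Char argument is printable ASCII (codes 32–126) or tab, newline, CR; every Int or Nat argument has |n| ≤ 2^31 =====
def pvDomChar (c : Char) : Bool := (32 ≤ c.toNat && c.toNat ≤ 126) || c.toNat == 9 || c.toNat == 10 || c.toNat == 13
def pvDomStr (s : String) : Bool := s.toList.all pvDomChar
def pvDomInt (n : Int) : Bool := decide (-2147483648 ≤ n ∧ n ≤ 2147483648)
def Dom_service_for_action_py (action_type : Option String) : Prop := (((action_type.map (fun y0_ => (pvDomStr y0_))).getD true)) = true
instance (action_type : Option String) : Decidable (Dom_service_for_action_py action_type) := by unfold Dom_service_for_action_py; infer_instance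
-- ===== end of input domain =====

-- B replaces A's scan over ten (prefix, service) pairs with repeated startswith by one
-- partition at the first underscore plus a single set-membership lookup (objective: idiomatic).

-- ===== PORT A =====
-- _SERVICE_PREFIXES, as a list of (prefix, service) pairs (prefix kept as List Char).
def pvServicePrefixes : List (List Char × String) :=
  [("s3_".toList, "s3"), ("ec2_".toList, "ec2"), ("iam_".toList, "iam"),
   ("rds_".toList, "rds"), ("ebs_".toList, "ebs"), ("eks_".toList, "eks"),
   ("ssm_".toList, "ssm"), ("guardduty_".toList, "guardduty"),
   ("cloudtrail_".toList, "cloudtrail"), ("config_".toList, "config")]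

-- the 'for prefix, service in _SERVICE_PREFIXES: if token.startswith(prefix): return service' loop
def pvFindService : List (List Char × String) → List Char → Option String
  | [], _ => none
  | (p, s) :: rest, t => if PySem.Chars.startswith t p then some s else pvFindService rest t

def service_for_action_py (action_type : Option String) : Option String :=
  -- token = str(action_type or "").strip().lower()   (None and "" are both falsy → "")
  let token := PySem.Chars.lower (PySem.Chars.strip (action_type.getD "").toList)
  if token = [] then none
  else pvFindService pvServicePrefixes token

-- ===== PORT B =====
def pvServices : List (List Char) :=
  ["s3".toList, "ec2".toList, "iam".toList, "rds".toList, "ebs".toList,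
   "eks".toList, "ssm".toList, "guardduty".toList, "cloudtrail".toList, "config".toList]

def service_for_action_py_alt (action_type : Option String) : Option String :=
  let token := PySem.Chars.lower (PySem.Chars.strip (action_type.getD "").toList)
  if token = [] then none
  else
    -- head, sep, _rest = token.partition("_"): head = chars before the first '_',
    -- sep_rest nonempty iff an '_' occurs (dropWhile keeps the '_' and the rest)
    let head := token.takeWhile (· ≠ '_')
    let sep_rest := token.dropWhile (· ≠ '_')
    if sep_rest ≠ [] ∧ head ∈ pvServices then some (String.ofList head) else none

-- ===== PRECONDITION & SPEC =====
def Spec_service_for_action_py (action_type : Option String) (out : Option String) : Prop := out = service_for_action_py_alt action_type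
instance (action_type : Option String) (out : Option String) : Decidable (Spec_service_for_action_py action_type out) := by unfold Spec_service_for_action_py; infer_instance

-- ===== CLAIM (what is proved, stated in full; the proofs are below) =====
def Claim_equal_service_for_action_py : Prop := ∀ (action_type : Option String), Dom_service_for_action_py action_type → Spec_service_for_action_py action_type (service_for_action_py action_type)

-- ===== LEMMAS AND PROOFS =====

-- (name ++ "_") is a prefix iff the partition head equals name and an '_' occurs,
-- provided the name itself contains no '_'.
theorem pv_prefix_iff (s : List Char) (hs : '_' ∉ s) (l : List Char) :
    (s ++ ['_']) <+: l ↔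
      (l.takeWhile (· ≠ '_') = s ∧ l.dropWhile (· ≠ '_') ≠ []) := by
  induction s generalizing l with
  | nil =>
    cases l with
    | nil => simp
    | cons c l' =>
      by_cases hc : c = '_'
      · subst hc
        simp [List.cons_prefix_cons]
      · have hcs : ¬ ('_' = c) := fun h => hc h.symm
        simp [List.cons_prefix_cons, hc, hcs]
  | cons a s' ih =>
    have ha : a ≠ '_' := fun h => hs (h ▸ List.mem_cons_self)
    have hs' : '_' ∉ s' := fun h => hs (List.mem_cons_of_mem _ h)
    cases l with
    | nil => simp
    | cons c l' =>
      by_cases hc : c = '_'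
      · subst hc
        have has : ¬ (a = '_') := ha
        simp [List.cons_prefix_cons, has]
      · have h0 : (a :: s' ++ ['_']) <+: (c :: l') ↔ (a = c ∧ (s' ++ ['_']) <+: l') :=
          List.cons_prefix_cons
        rw [h0, ih hs' l']
        simp only [List.takeWhile_cons, List.dropWhile_cons]
        simp [hc, and_assoc]
        tauto

-- the same fact as a Bool equation on startswith, usable as a rewrite on the if conditions
theorem pv_sw_eq (s : List Char) (hs : '_' ∉ s) (l : List Char) :
    PySem.Chars.startswith l (s ++ ['_']) =
      (decide (l.takeWhile (· ≠ '_') = s) && decide (l.dropWhile (· ≠ '_') ≠ [])) := by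
  rw [Bool.eq_iff_iff, PySem.Chars.startswith_iff]
  simp [pv_prefix_iff s hs l]

theorem pv_sw_s3 (t : List Char) :
    PySem.Chars.startswith t "s3_".toList =
      (decide (t.takeWhile (· ≠ '_') = "s3".toList) && decide (t.dropWhile (· ≠ '_') ≠ [])) := by
  have h := pv_sw_eq "s3".toList (by decide) t
  simpa using h

theorem pv_sw_ec2 (t : List Char) :
    PySem.Chars.startswith t "ec2_".toList =
      (decide (t.takeWhile (· ≠ '_') = "ec2".toList) && decide (t.dropWhile (· ≠ '_') ≠ [])) := by
  have h := pv_sw_eq "ec2".toList (by decide) t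
  simpa using h

theorem pv_sw_iam (t : List Char) :
    PySem.Chars.startswith t "iam_".toList =
      (decide (t.takeWhile (· ≠ '_') = "iam".toList) && decide (t.dropWhile (· ≠ '_') ≠ [])) := by
  have h := pv_sw_eq "iam".toList (by decide) t
  simpa using h

theorem pv_sw_rds (t : List Char) :
    PySem.Chars.startswith t "rds_".toList =
      (decide (t.takeWhile (· ≠ '_') = "rds".toList) && decide (t.dropWhile (· ≠ '_') ≠ [])) := by
  have h := pv_sw_eq "rds".toList (by decide) t
  simpa using h

theorem pv_sw_ebs (t : List Char) :
    PySem.Chars.startswith t "ebs_".toList =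
      (decide (t.takeWhile (· ≠ '_') = "ebs".toList) && decide (t.dropWhile (· ≠ '_') ≠ [])) := by
  have h := pv_sw_eq "ebs".toList (by decide) t
  simpa using h

theorem pv_sw_eks (t : List Char) :
    PySem.Chars.startswith t "eks_".toList =
      (decide (t.takeWhile (· ≠ '_') = "eks".toList) && decide (t.dropWhile (· ≠ '_') ≠ [])) := by
  have h := pv_sw_eq "eks".toList (by decide) t
  simpa using h

theorem pv_sw_ssm (t : List Char) :
    PySem.Chars.startswith t "ssm_".toList =
      (decide (t.takeWhile (· ≠ '_') = "ssm".toList) && decide (t.dropWhile (· ≠ '_') ≠ [])) := by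
  have h := pv_sw_eq "ssm".toList (by decide) t
  simpa using h

theorem pv_sw_guardduty (t : List Char) :
    PySem.Chars.startswith t "guardduty_".toList =
      (decide (t.takeWhile (· ≠ '_') = "guardduty".toList) && decide (t.dropWhile (· ≠ '_') ≠ [])) := by
  have h := pv_sw_eq "guardduty".toList (by decide) t
  simpa using h

theorem pv_sw_cloudtrail (t : List Char) :
    PySem.Chars.startswith t "cloudtrail_".toList =
      (decide (t.takeWhile (· ≠ '_') = "cloudtrail".toList) && decide (t.dropWhile (· ≠ '_') ≠ [])) := by
  have h := pv_sw_eq "cloudtrail".toList (by decide) t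
  simpa using h

theorem pv_sw_config (t : List Char) :
    PySem.Chars.startswith t "config_".toList =
      (decide (t.takeWhile (· ≠ '_') = "config".toList) && decide (t.dropWhile (· ≠ '_') ≠ [])) := by
  have h := pv_sw_eq "config".toList (by decide) t
  simpa using h

theorem pv_find_eq (t : List Char) :
    pvFindService pvServicePrefixes t =
      (if t.dropWhile (· ≠ '_') ≠ [] ∧ t.takeWhile (· ≠ '_') ∈ pvServices
       then some (String.ofList (t.takeWhile (· ≠ '_'))) else none) := by
  simp only [pvServicePrefixes, pvFindService, pv_sw_s3, pv_sw_ec2, pv_sw_iam, pv_sw_rds, pv_sw_ebs, pv_sw_eks, pv_sw_ssm, pv_sw_guardduty, pv_sw_cloudtrail, pv_sw_config]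
  by_cases hD : t.dropWhile (· ≠ '_') = []
  · have hn : '_' ∉ t := by
      intro hm
      have := List.dropWhile_eq_nil_iff.mp hD '_' hm
      simp at this
    simp [pvServices, hD, hn]
  have hu : '_' ∈ t := by
    by_contra hn
    exact hD (List.dropWhile_eq_nil_iff.mpr (fun x hx => by
      simp only [decide_eq_true_eq]
      exact fun h => hn (h ▸ hx)))
  by_cases h0 : t.takeWhile (fun x => !decide (x = '_')) = ['s', '3']
  · simp [pvServices, hu, h0]
  by_cases h1 : t.takeWhile (fun x => !decide (x = '_')) = ['e', 'c', '2']
  · simp [pvServices, hu, h0, h1]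
  by_cases h2 : t.takeWhile (fun x => !decide (x = '_')) = ['i', 'a', 'm']
  · simp [pvServices, hu, h0, h1, h2]
  by_cases h3 : t.takeWhile (fun x => !decide (x = '_')) = ['r', 'd', 's']
  · simp [pvServices, hu, h0, h1, h2, h3]
  by_cases h4 : t.takeWhile (fun x => !decide (x = '_')) = ['e', 'b', 's']
  · simp [pvServices, hu, h0, h1, h2, h3, h4]
  by_cases h5 : t.takeWhile (fun x => !decide (x = '_')) = ['e', 'k', 's']
  · simp [pvServices, hu, h0, h1, h2, h3, h4, h5]
  by_cases h6 : t.takeWhile (fun x => !decide (x = '_')) = ['s', 's', 'm']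
  · simp [pvServices, hu, h0, h1, h2, h3, h4, h5, h6]
  by_cases h7 : t.takeWhile (fun x => !decide (x = '_')) = ['g', 'u', 'a', 'r', 'd', 'd', 'u', 't', 'y']
  · simp [pvServices, hu, h0, h1, h2, h3, h4, h5, h6, h7]
  by_cases h8 : t.takeWhile (fun x => !decide (x = '_')) = ['c', 'l', 'o', 'u', 'd', 't', 'r', 'a', 'i', 'l']
  · simp [pvServices, hu, h0, h1, h2, h3, h4, h5, h6, h7, h8]
  by_cases h9 : t.takeWhile (fun x => !decide (x = '_')) = ['c', 'o', 'n', 'f', 'i', 'g']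
  · simp [pvServices, hu, h0, h1, h2, h3, h4, h5, h6, h7, h8, h9]
  simp [pvServices, hu, h0, h1, h2, h3, h4, h5, h6, h7, h8, h9]

-- ===== VERDICT (by name: the statement is the Claim_ definition above) =====
theorem service_for_action_py_spec : Claim_equal_service_for_action_py := by
  intro action_type _
  unfold Spec_service_for_action_py service_for_action_py service_for_action_py_alt
  by_cases ht : PySem.Chars.lower (PySem.Chars.strip (action_type.getD "").toList) = []
  · simp [ht]
  · simp only [ht, if_false, ite_false]
    exact pv_find_eq _
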